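-- pv_equiv track=rewrite | github.com/vhiwase/irisCarbon | scraper.py | hashify
-- ===== SOURCE A (Python) =====
-- def hashify(my_list):
--     if my_list is None:
--         return
--     else:
--         my_list = [l.strip() for l in my_list]
--         my_text = ' '.join(my_list)
--         hash_value_of_text = sum([ord(char) for char in my_text])
--         return hash_value_of_text
-- ===== SOURCE B (Python) =====
-- def hashify(my_list):
--     if my_list is None:
--         return
--     counts = {}
--     sep = ''
--     for word in my_list:
--         for c in sep + word.strip():
--             counts[c] = counts.get(c, 0) + 1
--         sep = ' '
--     return sum(ord(c) * n for c, n in counts.items())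
-- ===== Notes on version B (the rewrite author's own statement) =====
-- stated objective: alternative
-- what changed: B never materialises the joined text: it builds a character-frequency dictionary in one pass over the stripped words (inserting a space entry between consecutive words) and returns the weighted sum ord(c)*count over the dict items.
import Mathlib
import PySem

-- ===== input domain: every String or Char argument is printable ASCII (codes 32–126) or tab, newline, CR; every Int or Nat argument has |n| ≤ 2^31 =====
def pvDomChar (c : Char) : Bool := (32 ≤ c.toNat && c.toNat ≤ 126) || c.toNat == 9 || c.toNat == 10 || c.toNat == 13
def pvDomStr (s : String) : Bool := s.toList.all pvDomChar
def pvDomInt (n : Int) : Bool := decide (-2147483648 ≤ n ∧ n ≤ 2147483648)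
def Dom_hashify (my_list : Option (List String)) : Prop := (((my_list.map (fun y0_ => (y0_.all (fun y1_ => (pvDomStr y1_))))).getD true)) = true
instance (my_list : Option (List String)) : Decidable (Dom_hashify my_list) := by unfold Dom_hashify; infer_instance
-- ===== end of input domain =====

-- B builds a character-frequency dictionary instead of joining into one string, and returns the
-- weighted sum ord(c)*count over its items (objective: alternative data structure, same cost).

-- ===== PORT A =====
def hashify (my_list : Option (List String)) : Option Int :=
  match my_list with
  | none => none
  | some l =>
    let stripped := l.map (fun s => PySem.Str.strip s)
    let my_text := PySem.Str.join " " stripped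
    some ((my_text.toList.map (fun c => (c.toNat : Int))).sum)

-- ===== PORT B =====
-- loop body: for c in sep + word.strip(): counts[c] = counts.get(c, 0) + 1 ; sep = ' '
def hashifyAltStep (st : PySem.Dict Char Int × List Char) (w : String) :
    PySem.Dict Char Int × List Char :=
  ((st.2 ++ PySem.Chars.strip w.toList).foldl (fun d c => d.insert c (d.getD c 0 + 1)) st.1, [' '])

def hashify_alt (my_list : Option (List String)) : Option Int :=
  match my_list with
  | none => none
  | some l =>
    let st := l.foldl hashifyAltStep (PySem.Dict.empty, [])
    some ((st.1.items.map (fun p => (p.1.toNat : Int) * p.2)).sum)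

-- ===== PRECONDITION & SPEC =====
def Spec_hashify (my_list : Option (List String)) (out : Option Int) : Prop := out = hashify_alt my_list
instance (my_list : Option (List String)) (out : Option Int) : Decidable (Spec_hashify my_list out) := by unfold Spec_hashify; infer_instance

-- ===== CLAIM =====
def Claim_equal_hashify : Prop := ∀ (my_list : Option (List String)), Dom_hashify my_list → Spec_hashify my_list (hashify my_list)

-- ===== LEMMAS AND PROOFS =====

-- B's word loop counts exactly the characters of sep ++ ' '.join(stripped words)
theorem pv_loop_eq (l : List String) (d : PySem.Dict Char Int) (sep : List Char) (h : l ≠ []) :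
    (l.foldl hashifyAltStep (d, sep)).1
      = (sep ++ PySem.Chars.join [' '] (l.map (fun w => PySem.Chars.strip w.toList))).foldl
          (fun d c => d.insert c (d.getD c 0 + 1)) d := by
  induction l generalizing d sep with
  | nil => exact absurd rfl h
  | cons w t ih =>
    cases t with
    | nil =>
      simp [hashifyAltStep, PySem.Chars.join_singleton]
    | cons b u =>
      rw [List.foldl_cons]
      have hst : hashifyAltStep (d, sep) w
          = ((sep ++ PySem.Chars.strip w.toList).foldl (fun d c => d.insert c (d.getD c 0 + 1)) d, [' ']) := rfl
      rw [hst, ih _ _ (by simp)]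
      simp only [List.map_cons]
      rw [PySem.Chars.join_cons_cons, ← List.foldl_append]
      congr 1
      simp

-- weighted sum over Counter(xs).items equals the plain char-code sum of xs
theorem pv_counter_sum (xs : List Char) :
    (((PySem.Dict.counter xs).items.map (fun p => (p.1.toNat : Int) * p.2)).sum)
      = (xs.map (fun c => (c.toNat : Int))).sum := by
  rw [PySem.Dict.items_counter]
  rw [List.map_map]
  have hnd : (PySem.Set.ofList xs).Nodup := PySem.Set.nodup_ofList xs
  have h1 : ((PySem.Set.ofList xs).map (fun k => (k.toNat : Int) * (xs.count k : Int))).sum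
      = ∑ k ∈ (PySem.Set.ofList xs).toFinset, (k.toNat : Int) * (xs.count k : Int) := by
    rw [List.sum_toFinset _ hnd]
  have h2 : (PySem.Set.ofList xs).toFinset = xs.toFinset := by
    ext c
    simp [PySem.Set.mem_ofList]
  have h3 : ∑ k ∈ xs.toFinset, (k.toNat : Int) * (xs.count k : Int)
      = (xs.map (fun c => (c.toNat : Int))).sum := by
    have := Finset.sum_multiset_map_count (xs : Multiset Char) (fun c => (c.toNat : Int))
    simp only [List.toFinset_coe, Multiset.map_coe, Multiset.sum_coe, Multiset.coe_count] at this
    rw [this]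
    apply Finset.sum_congr rfl
    intro k _
    simp [mul_comm]
  simp only [Function.comp_def] at h1 ⊢
  rw [h1, h2, h3]

-- ===== VERDICT =====
theorem hashify_spec : Claim_equal_hashify := by
  intro my_list _
  unfold Spec_hashify hashify hashify_alt
  cases my_list with
  | none => rfl
  | some l =>
    simp only []
    cases l with
    | nil =>
      simp [PySem.Str.join, PySem.Dict.empty]
    | cons a t =>
      have hj : (PySem.Str.join " " ((a :: t).map (fun s => PySem.Str.strip s))).toList
          = PySem.Chars.join [' '] (((a :: t).map (fun s => PySem.Str.strip s)).map String.toList) := by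
        simp [PySem.Str.toList_join]
      rw [hj]
      rw [pv_loop_eq (a :: t) PySem.Dict.empty [] (by simp)]
      rw [List.nil_append]
      rw [PySem.Dict.foldl_insert_getD_add_one_eq_counter]
      rw [pv_counter_sum]
      congr 1
      simp [PySem.Str.toList_strip, Function.comp_def]
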